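-- pv_equiv track=rewrite | github.com/mat2ja/asp-python | Kolokvij i vjezbanje/Hashiranje/HASH1/Labos/grupe.py | grupe
-- ===== SOURCE A (Python) =====
-- def grupe(arr):
--     freq = {n: arr.count(n) for n in arr}
--
--     output = []
--     for k, v in freq.items():
--         grupa = []
--         for i in range(v):
--             grupa.append(k)
--         output.append(tuple(grupa))
--     return output
-- ===== SOURCE B (Python) =====
-- def grupe(arr):
--     groups = {}
--     for n in arr:
--         groups.setdefault(n, []).append(n)
--     return [tuple(v) for v in groups.values()]
-- ===== Notes on version B (the rewrite author's own statement) =====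
-- stated objective: faster
-- what changed: Replaces the count-then-rebuild two-phase algorithm (arr.count per element, then a range loop regenerating each tuple) with a single pass that appends each element to its group in a dict of lists and returns the values.
import Mathlib
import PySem

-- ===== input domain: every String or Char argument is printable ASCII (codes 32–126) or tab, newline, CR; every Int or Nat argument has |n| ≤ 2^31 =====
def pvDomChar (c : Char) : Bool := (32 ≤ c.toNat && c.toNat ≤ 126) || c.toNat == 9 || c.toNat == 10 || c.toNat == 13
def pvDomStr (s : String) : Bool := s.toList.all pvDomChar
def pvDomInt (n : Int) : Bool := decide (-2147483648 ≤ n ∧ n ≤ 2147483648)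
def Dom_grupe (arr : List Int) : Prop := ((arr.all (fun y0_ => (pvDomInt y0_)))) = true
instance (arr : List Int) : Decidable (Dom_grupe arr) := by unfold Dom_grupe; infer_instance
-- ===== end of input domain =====

-- B replaces A's two-phase count-then-rebuild (arr.count per element, then a range loop
-- regenerating each tuple) by a single pass accumulating each group in a dict of lists.

-- ===== PORT A =====
def grupe (arr : List Int) : List (List Int) :=
  -- freq = {n: arr.count(n) for n in arr}
  let freq : PySem.Dict Int Int :=
    arr.foldl (fun d n => d.insert n (PySem.List.count arr n)) PySem.Dict.empty
  -- output = []; for k, v in freq.items(): grupa = []; for i in range(v): grupa.append(k); output.append(tuple(grupa))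
  freq.items.foldl (fun output kv =>
    let grupa : List Int := (PySem.List.pyRange 0 kv.2 1).foldl (fun g _ => g ++ [kv.1]) []
    output ++ [grupa]) []

-- ===== PORT B =====
def grupe_alt (arr : List Int) : List (List Int) :=
  -- groups = {}; for n in arr: groups.setdefault(n, []).append(n)
  let groups : PySem.Dict Int (List Int) :=
    arr.foldl (fun d n => d.modify n [] (fun g => g ++ [n])) PySem.Dict.empty
  -- return [tuple(v) for v in groups.values()]  (tuple(v) is the identity under the List convention)
  groups.values.map (fun v => v)

-- ===== PRECONDITION & SPEC =====
def Spec_grupe (arr : List Int) (out : List (List Int)) : Prop := out = grupe_alt arr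
instance (arr : List Int) (out : List (List Int)) : Decidable (Spec_grupe arr out) := by unfold Spec_grupe; infer_instance

-- ===== CLAIM (what is proved, stated in full; the proofs are below) =====
def Claim_equal_grupe : Prop := ∀ (arr : List Int), Dom_grupe arr → Spec_grupe arr (grupe arr)

-- ===== LEMMAS AND PROOFS =====

-- set(l ++ [x]) in first-occurrence order
theorem ofList_concat (l : List Int) (x : Int) :
    PySem.Set.ofList (l ++ [x]) =
      if x ∈ l then PySem.Set.ofList l else PySem.Set.ofList l ++ [x] := by
  have h : PySem.Set.ofList (l ++ [x]) = PySem.Set.add (PySem.Set.ofList l) x := by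
    simp [PySem.Set.ofList_eq_foldl]
  rw [h]
  by_cases hx : x ∈ l
  · simp [PySem.Set.add, hx]
  · simp [PySem.Set.add, hx]

-- d.modify k [] f is an insert of the modified value
theorem modify_eq_insert (d : PySem.Dict Int (List Int)) (k : Int) (f : List Int → List Int) :
    d.modify k [] f = d.insert k (f (d.getD k [])) := by
  simp [PySem.Dict.modify]

-- A's dict-comprehension loop: items are the distinct keys in first-occurrence order, each with c k
theorem items_A (c : Int → Int) (l : List Int) :
    (l.foldl (fun d n => d.insert n (c n)) PySem.Dict.empty).items
      = (PySem.Set.ofList l).map (fun k => (k, c k)) := by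
  induction l using List.reverseRecOn with
  | nil => simp [PySem.Dict.empty]
  | append_singleton l x ih =>
    rw [List.foldl_append]
    simp only [List.foldl_cons, List.foldl_nil]
    set d := l.foldl (fun d n => d.insert n (c n)) PySem.Dict.empty with hd
    have hkeys : d.keys = PySem.Set.ofList l := by
      simp [PySem.Dict.keys, ih, Function.comp_def]
    have hcont : d.contains x = decide (x ∈ l) := by
      rw [PySem.Dict.contains_eq_decide_mem_keys, hkeys]
      simp [PySem.Set.mem_ofList]
    by_cases hx : x ∈ l
    · have hc : d.contains x = true := by simp [hcont, hx]
      rw [PySem.Dict.items_insert]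
      simp only [hc, if_true]
      rw [ih, ofList_concat, if_pos hx, List.map_map]
      apply List.map_congr_left
      intro k _
      by_cases hk : k = x <;> simp [hk]
    · have hc : d.contains x = false := by simp [hcont, hx]
      rw [PySem.Dict.items_insert]
      simp only [hc, if_false, Bool.false_eq_true]
      rw [ih, ofList_concat, if_neg hx, List.map_append]
      simp

-- B's grouping loop: items are the distinct keys in first-occurrence order, each with its occurrences
theorem items_B (l : List Int) :
    (l.foldl (fun d n => d.modify n [] (fun g => g ++ [n])) PySem.Dict.empty).items
      = (PySem.Set.ofList l).map (fun k => (k, l.filter (· == k))) := by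
  induction l using List.reverseRecOn with
  | nil => simp [PySem.Dict.empty]
  | append_singleton l x ih =>
    rw [List.foldl_append]
    simp only [List.foldl_cons, List.foldl_nil]
    set d := l.foldl (fun d n => d.modify n [] (fun g => g ++ [n])) PySem.Dict.empty with hd
    have hkeys : d.keys = PySem.Set.ofList l := by
      simp [PySem.Dict.keys, ih, Function.comp_def]
    have hnodup : d.keys.Nodup := by rw [hkeys]; exact PySem.Set.nodup_ofList l
    have hcont : d.contains x = decide (x ∈ l) := by
      rw [PySem.Dict.contains_eq_decide_mem_keys, hkeys]
      simp [PySem.Set.mem_ofList]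
    rw [modify_eq_insert]
    by_cases hx : x ∈ l
    · have hmem : (x, l.filter (· == x)) ∈ d.items := by
        rw [ih]
        exact List.mem_map.2 ⟨x, (PySem.Set.mem_ofList _ _).2 hx, rfl⟩
      have hget : d.getD x [] = l.filter (· == x) :=
        PySem.Dict.getD_of_mem_items d hmem hnodup []
      have hc : d.contains x = true := by simp [hcont, hx]
      rw [hget, PySem.Dict.items_insert]
      simp only [hc, if_true]
      rw [ih, ofList_concat, if_pos hx, List.map_map]
      apply List.map_congr_left
      intro k _
      by_cases hk : k = x
      · subst hk; simp [List.filter_append]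
      · have hxk : ¬ (x == k) = true := by
          simp only [beq_iff_eq]
          exact fun h => hk h.symm
        simp [hk, List.filter_append, hxk]
    · have hget : d.getD x [] = [] := by
        apply PySem.Dict.getD_of_not_contains
        simp [hcont, hx]
      have hfilx : l.filter (· == x) = [] := by
        rw [List.filter_eq_nil_iff]
        intro a ha
        simp only [beq_iff_eq]
        intro h; exact hx (h ▸ ha)
      have hc : d.contains x = false := by simp [hcont, hx]
      rw [hget, PySem.Dict.items_insert]
      simp only [hc, if_false, Bool.false_eq_true]
      rw [ih, ofList_concat, if_neg hx, List.map_append]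
      congr 1
      · apply List.map_congr_left
        intro k hk
        have hkl : k ∈ l := (PySem.Set.mem_ofList _ _).1 hk
        have hkx : ¬ (x == k) = true := by
          simp only [beq_iff_eq]
          intro h; exact hx (h ▸ hkl)
        simp [List.filter_append, hkx]
      · simp [List.filter_append, hfilx]

-- the inner range loop of A regenerates the group of k
theorem inner_map (arr : List Int) (k : Int) :
    List.map (fun _ => k) (PySem.List.pyRange 0 (PySem.List.count arr k) 1)
      = arr.filter (· == k) := by
  have hc : PySem.List.count arr k = ((arr.count k : Nat) : Int) := by
    simp [PySem.List.count]
  have hlen : (PySem.List.pyRange 0 (PySem.List.count arr k) 1).length = arr.count k := by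
    rw [hc]; simp [PySem.List.pyRange]
    intro h
    exact (List.count_eq_zero_of_not_mem h).symm
  rw [List.map_const', hlen, List.filter_beq]

-- ===== VERDICT (by name: the statement is the Claim_ definition above) =====
theorem grupe_spec : Claim_equal_grupe := by
  intro arr _
  unfold Spec_grupe grupe grupe_alt
  simp only [PySem.Dict.values, items_A (fun n => PySem.List.count arr n) arr, items_B arr,
    PySem.List.foldl_append_singleton_eq_map, List.map_map, List.nil_append]
  apply List.map_congr_left
  intro k _
  simp only [Function.comp_def]
  exact inner_map arr k
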